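-- pv_equiv track=rewrite | github.com/jcolinpatrick/kryptos | scripts/transposition/columnar/e_grid31_k4_transposition_01.py | snake_read
-- ===== SOURCE A (Python) =====
-- def snake_read(text, width):
--     """Write text in rows, read boustrophedon (snake/zigzag)."""
--     nrows = (len(text) + width - 1) // width
--     grid = {}
--     for i, ch in enumerate(text):
--         r, c = divmod(i, width)
--         grid[(r, c)] = ch
--
--     result = []
--     for r in range(nrows):
--         cols = range(width) if r % 2 == 0 else range(width - 1, -1, -1)
--         for c in cols:
--             if (r, c) in grid:
--                 result.append(grid[(r, c)])
--     return ''.join(result)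
-- ===== SOURCE B (Python) =====
-- def snake_read(text, width):
--     """Write text in rows, read boustrophedon (snake/zigzag)."""
--     nrows = (len(text) + width - 1) // width
--     parts = []
--     for r in range(nrows):
--         row = text[r * width:(r + 1) * width]
--         parts.append(row if r % 2 == 0 else row[::-1])
--     return ''.join(parts)
-- ===== Notes on version B (the rewrite author's own statement) =====
-- stated objective: faster
-- what changed: B drops A's dict-of-cells entirely: it slices the text row by row (text[r*width:(r+1)*width]) and reverses odd rows directly, instead of building a coordinate dict and re-scanning column ranges with per-cell membership tests.
import Mathlib
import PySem

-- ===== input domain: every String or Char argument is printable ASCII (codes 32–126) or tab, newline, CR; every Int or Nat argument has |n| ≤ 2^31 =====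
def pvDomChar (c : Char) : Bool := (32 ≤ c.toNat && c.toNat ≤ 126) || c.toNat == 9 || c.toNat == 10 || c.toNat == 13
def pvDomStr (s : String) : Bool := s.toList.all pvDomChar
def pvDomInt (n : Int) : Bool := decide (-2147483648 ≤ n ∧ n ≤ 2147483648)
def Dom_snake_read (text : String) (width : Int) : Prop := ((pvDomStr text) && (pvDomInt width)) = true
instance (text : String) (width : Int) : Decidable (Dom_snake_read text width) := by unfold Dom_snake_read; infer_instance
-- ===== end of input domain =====

-- B replaces A's coordinate dict + per-cell column-range rescans with direct row slices, reversing odd rows (same O(n) result, measured constant-factor faster).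

-- ===== PORT A =====
-- A-side helper: the dict `grid` built by A's first loop
def snakeGrid (l : List Char) (width : Int) : PySem.Dict (Int × Int) Char :=
  (PySem.List.enumerate l 0).foldl
    (fun (g : PySem.Dict (Int × Int) Char) ic =>
      g.insert (PySem.Int.floordiv ic.1 width, PySem.Int.mod ic.1 width) ic.2)
    PySem.Dict.empty

def snake_read (text : String) (width : Int) : String :=
  let l := text.toList
  let nrows := PySem.Int.floordiv (PySem.List.len l + width - 1) width
  let grid := snakeGrid l width
  let result := (PySem.List.pyRange 0 nrows 1).foldl
    (fun (res : List Char) r =>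
      let cols := if PySem.Int.mod r 2 = 0 then PySem.List.pyRange 0 width 1
                  else PySem.List.pyRange (width - 1) (-1) (-1)
      cols.foldl (fun res c =>
        match grid.get? (r, c) with
        | some ch => res ++ [ch]
        | none => res) res)
    []
  String.ofList result

-- ===== PORT B =====
def snake_read_alt (text : String) (width : Int) : String :=
  let l := text.toList
  let nrows := PySem.Int.floordiv (PySem.List.len l + width - 1) width
  let parts := (PySem.List.pyRange 0 nrows 1).foldl
    (fun (acc : List Char) r =>
      let row := PySem.List.slice l (some (r * width)) (some ((r + 1) * width))
      acc ++ (if PySem.Int.mod r 2 = 0 then row else row.reverse))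
    []
  String.ofList parts

-- ===== PRECONDITION & SPEC =====
-- Pre_ excludes exactly width = 0, where A raises ZeroDivisionError.
def Pre_snake_read (_text : String) (width : Int) : Prop := width ≠ 0
instance (text : String) (width : Int) : Decidable (Pre_snake_read text width) := by unfold Pre_snake_read; infer_instance
def pvWitness_snake_read : String × Int := ("abcdefg", 3)

def Spec_snake_read (text : String) (width : Int) (out : String) : Prop := out = snake_read_alt text width
instance (text : String) (width : Int) (out : String) : Decidable (Spec_snake_read text width out) := by unfold Spec_snake_read; infer_instance

-- ===== CLAIM (what is proved, stated in full; the proofs are below) =====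
def Claim_equal_snake_read : Prop := ∀ (text : String) (width : Int), Dom_snake_read text width → Pre_snake_read text width → Spec_snake_read text width (snake_read text width)

-- ===== LEMMAS AND PROOFS =====

-- the dict `grid` is exactly indexed access into the text (positive width)
theorem snakeGrid_get? (l : List Char) (w : Int) (hw : 0 < w) (r c : Int) :
    (snakeGrid l w).get? (r, c)
      = if 0 ≤ r ∧ 0 ≤ c ∧ c < w then l[(r * w + c).toNat]? else none := by
  induction l using List.reverseRecOn with
  | nil =>
      unfold snakeGrid
      split <;> simp [PySem.List.enumerate]
  | append_singleton xs x ih =>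
      have hsem : snakeGrid (xs ++ [x]) w
          = (snakeGrid xs w).insert
              (PySem.Int.floordiv ((0 : Int) + xs.length) w,
               PySem.Int.mod ((0 : Int) + xs.length) w) x := by
        unfold snakeGrid
        rw [PySem.List.enumerate_append]
        simp [PySem.List.enumerate]
      simp only [zero_add] at hsem
      set n : Int := (xs.length : Int) with hn
      rw [hsem, PySem.Dict.get?_insert]
      rw [PySem.Int.floordiv_eq_ediv_of_pos hw, PySem.Int.mod_eq_emod_of_pos hw]
      have hn0 : 0 ≤ n := by positivity
      have hq0 : 0 ≤ n / w := Int.ediv_nonneg hn0 hw.le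
      have hm0 : 0 ≤ n % w := Int.emod_nonneg _ (ne_of_gt hw)
      have hmw : n % w < w := Int.emod_lt_of_pos _ hw
      have heq : (n / w) * w + n % w = n := by
        have := Int.mul_ediv_add_emod n w
        linarith
      by_cases hk : (r, c) = (n / w, n % w)
      · rw [if_pos hk]
        rw [Prod.ext_iff] at hk
        obtain ⟨hr1, hc1⟩ := hk
        simp only at hr1 hc1
        rw [if_pos ⟨hr1 ▸ hq0, hc1 ▸ hm0, hc1 ▸ hmw⟩]
        have hidx : (r * w + c).toNat = xs.length := by
          rw [hr1, hc1, heq]; omega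
        rw [hidx]
        simp
      · rw [if_neg hk, ih]
        by_cases hcond : 0 ≤ r ∧ 0 ≤ c ∧ c < w
        · rw [if_pos hcond, if_pos hcond]
          have hne : r * w + c ≠ n := by
            intro habs
            apply hk
            have h2 : n / w = r ∧ n % w = c :=
              (Int.ediv_emod_unique hw).mpr ⟨by linarith, hcond.2.1, hcond.2.2⟩
            exact Prod.ext h2.1.symm h2.2.symm
          have hge : 0 ≤ r * w + c := by
            have := mul_nonneg hcond.1 hw.le
            omega
          have hlen : (xs ++ [x]).length = xs.length + 1 := by simp
          by_cases hlt : (r * w + c).toNat < xs.length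
          · rw [List.getElem?_append_left hlt]
          · rw [List.getElem?_eq_none (by omega), List.getElem?_eq_none (by omega)]
        · rw [if_neg hcond, if_neg hcond]

-- filterMap of indexed access over a Nat range is drop/take
theorem filterMap_range_getElem? (l : List Char) (a n : ℕ) :
    (List.range n).filterMap (fun k => l[a + k]?) = (l.drop a).take n := by
  induction n with
  | zero => simp
  | succ n ih =>
      rw [List.range_succ, List.filterMap_append, ih, List.take_add_one]
      cases h : l[a + n]? <;> simp [List.getElem?_drop, h]

-- flatMap of Option.toList is filterMap
theorem flatMap_optToList (L : List Int) (F : Int → Option Char) :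
    L.flatMap (fun c => (F c).toList) = L.filterMap F := by
  induction L with
  | nil => simp
  | cons y ys ih => cases h : F y <;> simp [h, ih]

-- the characters A collects for row r are exactly B's slice
theorem row_chars (l : List Char) (w : Int) (hw : 0 < w) (r : Int) (hr : 0 ≤ r) :
    (PySem.List.pyRange 0 w 1).filterMap (fun c => l[(r * w + c).toNat]?)
      = PySem.List.slice l (some (r * w)) (some ((r + 1) * w)) := by
  have hrw : 0 ≤ r * w := mul_nonneg hr hw.le
  rw [PySem.List.pyRange_one, List.filterMap_map]
  have hfun : ((fun c => l[(r * w + c).toNat]?) ∘ fun k : ℕ => (0 : Int) + (k : Int))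
      = fun k : ℕ => l[(r * w).toNat + k]? := by
    funext k
    simp only [Function.comp]
    congr 1
    omega
  rw [hfun, filterMap_range_getElem?]
  rw [PySem.List.slice_toNat l hrw (by positivity)]
  congr 1
  have h2 : (r + 1) * w = r * w + w := by ring
  omega

-- A's inner fold over the even-row column range appends the slice
theorem row_even (l : List Char) (w : Int) (hw : 0 < w) (r : Int) (hr : 0 ≤ r) (res : List Char) :
    (PySem.List.pyRange 0 w 1).foldl
      (fun res c =>
        match (snakeGrid l w).get? (r, c) with
        | some ch => res ++ [ch]
        | none => res) res
      = res ++ PySem.List.slice l (some (r * w)) (some ((r + 1) * w)) := by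
  rw [PySem.List.foldl_congr_mem _ _
        (fun res c => res ++ (l[(r * w + c).toNat]?).toList) _ ?_]
  · rw [PySem.List.foldl_append_eq_flatMap, flatMap_optToList, row_chars l w hw r hr]
  · intro res c hc
    rw [PySem.List.mem_pyRange_one] at hc
    rw [snakeGrid_get? l w hw, if_pos ⟨hr, hc.1, hc.2⟩]
    cases h : l[(r * w + c).toNat]? <;> simp [h]

-- A's inner fold over the odd-row column range appends the reversed slice
theorem row_odd (l : List Char) (w : Int) (hw : 0 < w) (r : Int) (hr : 0 ≤ r) (res : List Char) :
    (PySem.List.pyRange (w - 1) (-1) (-1)).foldl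
      (fun res c =>
        match (snakeGrid l w).get? (r, c) with
        | some ch => res ++ [ch]
        | none => res) res
      = res ++ (PySem.List.slice l (some (r * w)) (some ((r + 1) * w))).reverse := by
  have hrange : PySem.List.pyRange (w - 1) (-1) (-1) = (PySem.List.pyRange 0 w 1).reverse := by
    rw [PySem.List.pyRange_neg_one_eq_reverse]
    norm_num
  rw [hrange]
  rw [PySem.List.foldl_congr_mem _ _
        (fun res c => res ++ (l[(r * w + c).toNat]?).toList) _ ?_]
  · rw [PySem.List.foldl_append_eq_flatMap, flatMap_optToList]
    rw [List.filterMap_reverse, row_chars l w hw r hr]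
  · intro res c hc
    rw [List.mem_reverse, PySem.List.mem_pyRange_one] at hc
    rw [snakeGrid_get? l w hw, if_pos ⟨hr, hc.1, hc.2⟩]
    cases h : l[(r * w + c).toNat]? <;> simp [h]

-- a fold whose body ignores the element is the identity
theorem foldl_keep (L : List Int) (init : List Char) :
    L.foldl (fun a _ => a) init = init := by
  induction L generalizing init with
  | nil => rfl
  | cons y ys ih => exact ih init

-- Python's % has the divisor's sign: fmod is nonpositive for a negative divisor
theorem fmod_nonpos' (a b : ℤ) (hb : b < 0) : a.fmod b ≤ 0 := by
  rw [Int.fmod_eq_emod]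
  by_cases hd : 0 ≤ b ∨ b ∣ a
  · rcases hd with h0 | hdvd
    · omega
    · rw [if_pos (Or.inr hdvd), Int.emod_eq_zero_of_dvd hdvd]
      omega
  · rw [if_neg hd]
    have h1 : a % b < -b := by
      rw [← Int.emod_neg]
      exact Int.emod_lt_of_pos a (by omega)
    omega

-- floor division by a negative divisor rounds down: q ≤ (q // w) * w
theorem fdiv_mul_ge (q w : ℤ) (hw : w < 0) : q ≤ q.fdiv w * w := by
  have h := Int.mul_fdiv_add_fmod q w
  have h2 := fmod_nonpos' q w hw
  nlinarith [h, h2]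

-- with negative width, a row admitted by nrows gives an empty slice
theorem slice_row_neg (l : List Char) (w r : Int) (hw : w < 0) (hr : 0 ≤ r)
    (hb : (l.length : Int) ≤ r * w + 1) :
    PySem.List.slice l (some (r * w)) (some ((r + 1) * w)) = [] := by
  apply List.length_eq_zero_iff.mp
  rw [PySem.List.length_slice]
  have h1 : (r + 1) * w = r * w + w := by ring
  have hrw0 : r * w ≤ 0 := by nlinarith
  rw [h1]
  simp only [PySem.List.clampIdx]
  split_ifs <;> omega

-- ===== VERDICT (by name: the statement is the Claim_ definition above) =====
theorem snake_read_spec : Claim_equal_snake_read := by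
  intro text width _hdom hpre
  unfold Pre_snake_read at hpre
  unfold Spec_snake_read snake_read snake_read_alt
  dsimp only
  apply congrArg String.ofList
  rcases lt_or_gt_of_ne hpre with hneg | hpos
  · -- width < 0: both folds keep the accumulator, both sides are []
    rw [PySem.List.foldl_congr_mem _ _ (fun (res : List Char) (_ : Int) => res) _ ?hA,
        foldl_keep,
        PySem.List.foldl_congr_mem _ _ (fun (res : List Char) (_ : Int) => res) _ ?hB,
        foldl_keep]
    case hA =>
      intro acc r _
      rw [PySem.List.pyRange_one_eq_nil (by omega), PySem.List.pyRange_neg_one_eq_nil (by omega)]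
      split <;> rfl
    case hB =>
      intro acc r hrm
      rw [PySem.List.mem_pyRange_one] at hrm
      obtain ⟨hr0, hrn⟩ := hrm
      have hfd : r + 1 ≤ PySem.Int.floordiv (PySem.List.len text.toList + width - 1) width := by omega
      have hfd' : r + 1 ≤ ((PySem.List.len text.toList + width - 1).fdiv width) := hfd
      have h1 : PySem.List.len text.toList + width - 1
          ≤ ((PySem.List.len text.toList + width - 1).fdiv width) * width :=
        fdiv_mul_ge _ _ hneg
      have h3 : ((PySem.List.len text.toList + width - 1).fdiv width) * width ≤ (r + 1) * width :=
        mul_le_mul_of_nonpos_right hfd' hneg.le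
      have hb : ((text.toList.length : Int)) ≤ r * width + 1 := by
        have h4 : (r + 1) * width = r * width + width := by ring
        have h5 : PySem.List.len text.toList = (text.toList.length : Int) := PySem.List.len_eq _
        rw [h5] at h1 h3
        omega
      rw [slice_row_neg text.toList width r hneg hr0 hb]
      split <;> simp
  · -- width > 0: each row of A is B's slice (reversed on odd rows)
    apply PySem.List.foldl_congr_mem
    intro res r hrm
    rw [PySem.List.mem_pyRange_one] at hrm
    by_cases hm : PySem.Int.mod r 2 = 0
    · rw [if_pos hm, if_pos hm]
      exact row_even text.toList width hpos r hrm.1 res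
    · rw [if_neg hm, if_neg hm]
      exact row_odd text.toList width hpos r hrm.1 res
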